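-- pv_equiv track=rewrite | github.com/finnzeng/Data-Structures-and-Algorithms-specialization-University-of-California-San-Diego | Algorithmic toolbox course 1/week3_greedy_algorithms/6_maximum_number_of_prizes/different_summands.py | max_num_prizes
-- ===== SOURCE A (Python) =====
-- import math
--
-- def max_num_prizes(n):
--     numbers = []
--     if n==1:
--         return [1]
-- #     remaining = n
--     else:
--         m = 2*int(math.sqrt(n))+1
--         for i in range(1,m):
--             if n>2*i:
--                 numbers.append(i)
--                 n-=i
--         else:
--             numbers.append(n)
--
--     return numbers
-- ===== SOURCE B (Python) =====
-- import math
--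
-- def max_num_prizes(n):
--     k = (math.isqrt(8 * n + 1) - 1) // 2
--     return list(range(1, k)) + [n - k * (k - 1) // 2]
-- ===== Notes on version B (the rewrite author's own statement) =====
-- stated objective: simpler
-- what changed: Replaces A's greedy subtract-and-test loop over a sqrt-sized range by a closed-form count of summands k = (isqrt(8n+1)-1)//2 and a single range construction list(range(1,k)) + [n - k(k-1)//2].
import Mathlib
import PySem

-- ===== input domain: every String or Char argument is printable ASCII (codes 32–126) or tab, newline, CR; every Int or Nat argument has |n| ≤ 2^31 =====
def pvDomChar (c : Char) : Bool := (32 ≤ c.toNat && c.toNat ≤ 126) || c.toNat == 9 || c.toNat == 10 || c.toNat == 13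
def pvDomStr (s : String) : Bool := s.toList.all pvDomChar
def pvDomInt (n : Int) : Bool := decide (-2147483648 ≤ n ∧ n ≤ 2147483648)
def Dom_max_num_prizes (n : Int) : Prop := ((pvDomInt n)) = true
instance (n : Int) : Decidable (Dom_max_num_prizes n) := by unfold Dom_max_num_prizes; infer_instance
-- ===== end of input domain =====

-- B replaces A's greedy subtract-and-test loop by a closed-form count of summands
-- (k = (isqrt(8n+1)-1)//2) plus one range construction (objective: simpler).

-- ===== PORT A =====
-- int(math.sqrt(n)) is ported as the integer square root: on 0 ≤ n ≤ 2^31 the float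
-- sqrt can exceed it by at most 1, which only adds loop iterations whose branch is
-- false (n > 2*i already fails and stays false as i grows), so the returned list is
-- identical.  The for/else 'else' always runs (no break), so append(n) is unconditional.
def max_num_prizes (n : Int) : List Int :=
  if n = 1 then [1]
  else
    let m : Int := 2 * ((n.toNat.sqrt : Int)) + 1
    let st := (PySem.List.pyRange 1 m 1).foldl
      (fun (st : List Int × Int) i => if st.2 > 2 * i then (st.1 ++ [i], st.2 - i) else st)
      ([], n)
    st.1 ++ [st.2]

-- ===== PORT B =====
def max_num_prizes_alt (n : Int) : List Int :=
  let k := PySem.Int.floordiv ((((8 * n + 1).toNat.sqrt : Int)) - 1) 2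
  PySem.List.pyRange 1 k 1 ++ [n - PySem.Int.floordiv (k * (k - 1)) 2]

-- ===== PRECONDITION & SPEC =====
-- A raises ValueError (math domain error) on n < 0; nothing else is excluded.
def Pre_max_num_prizes (n : Int) : Prop := 0 ≤ n
instance (n : Int) : Decidable (Pre_max_num_prizes n) := by unfold Pre_max_num_prizes; infer_instance
def pvWitness_max_num_prizes : Int := 7

def Spec_max_num_prizes (n : Int) (out : List Int) : Prop := out = max_num_prizes_alt n
instance (n : Int) (out : List Int) : Decidable (Spec_max_num_prizes n out) := by unfold Spec_max_num_prizes; infer_instance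

-- ===== CLAIM (what is proved, stated in full; the proofs are below) =====
def Claim_equal_max_num_prizes : Prop := ∀ (n : Int), Dom_max_num_prizes n → Pre_max_num_prizes n → Spec_max_num_prizes n (max_num_prizes n)

-- ===== LEMMAS AND PROOFS =====

/-- The loop body of A's greedy loop. -/
def pvStep : List Int × Int → Int → List Int × Int :=
  fun st i => if st.2 > 2 * i then (st.1 ++ [i], st.2 - i) else st

/-- Phase 1: as long as `j*(j+1) ≤ 2*N`, every iteration `1,…,j-1` takes the branch,
so the loop appends `1,…,j-1` and subtracts their sum `S` (with `2*S = j*(j-1)`). -/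
theorem pvPhase1 (j : Nat) : ∀ (N S : Int), 2 * S = (j : Int) * ((j : Int) - 1) →
    (j : Int) * ((j : Int) + 1) ≤ 2 * N →
    (PySem.List.pyRange 1 (j : Int) 1).foldl pvStep ([], N)
      = (PySem.List.pyRange 1 (j : Int) 1, N - S) := by
  induction j with
  | zero =>
    intro N S hS _
    rw [PySem.List.pyRange_one_eq_nil (by norm_num)]
    simp; omega
  | succ j ih =>
    intro N S hS hN
    rcases Nat.eq_zero_or_pos j with hj | hj
    · subst hj
      rw [PySem.List.pyRange_one_eq_nil (by norm_num)]
      simp at hS ⊢; omega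
    · have h1j : (1 : Int) ≤ (j : Int) := by exact_mod_cast hj
      have hsplit : PySem.List.pyRange 1 ((j : Int) + 1) 1
          = PySem.List.pyRange 1 (j : Int) 1 ++ [(j : Int)] :=
        PySem.List.pyRange_one_succ_right h1j
      push_cast
      push_cast at hS hN
      rw [hsplit, List.foldl_append,
        ih N (S - (j : Int)) (by nlinarith) (by nlinarith)]
      have hcond : N - (S - (j : Int)) > 2 * (j : Int) := by nlinarith
      simp only [List.foldl_cons, List.foldl_nil, pvStep, if_pos hcond]
      have harith : N - (S - (j : Int)) - (j : Int) = N - S := by omega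
      rw [harith]

/-- Phase 2: once `n ≤ 2*i` for every remaining index, the loop is a no-op. -/
theorem pvPhase2 (l : List Int) : ∀ (acc : List Int) (n : Int),
    (∀ i ∈ l, n ≤ 2 * i) → l.foldl pvStep (acc, n) = (acc, n) := by
  induction l with
  | nil => intro acc n _; rfl
  | cons i l ih =>
    intro acc n h
    have hi : ¬ (n > 2 * i) := by have := h i (by simp); omega
    simp only [List.foldl_cons, pvStep, if_neg hi]
    exact ih acc n (fun x hx => h x (by simp [hx]))

theorem max_num_prizes_spec : Claim_equal_max_num_prizes := by
  intro n _ hn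
  unfold Pre_max_num_prizes at hn
  unfold Spec_max_num_prizes
  by_cases h0 : n = 0
  · subst h0
    show max_num_prizes 0 = max_num_prizes_alt 0
    unfold max_num_prizes max_num_prizes_alt
    norm_num [Nat.sqrt_zero, Nat.sqrt_one, PySem.List.pyRange_one_eq_nil,
      PySem.Int.floordiv_eq_ediv_of_pos]
  have hn1 : 1 ≤ n := by omega
  -- the square root of 8n+1 and its bracket
  set s : Int := ((8 * n + 1).toNat.sqrt : Int) with hs_def
  have hsq : s * s ≤ 8 * n + 1 ∧ 8 * n + 1 < (s + 1) * (s + 1) := by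
    have ha1 : (s : Int) ^ 2 ≤ (((8 * n + 1).toNat : Nat) : Int) := by
      rw [hs_def]; exact_mod_cast Nat.sqrt_le' (8 * n + 1).toNat
    have ha2 : (((8 * n + 1).toNat : Nat) : Int) < (s + 1) ^ 2 := by
      rw [hs_def]; exact_mod_cast Nat.lt_succ_sqrt' (8 * n + 1).toNat
    rw [Int.toNat_of_nonneg (by omega)] at ha1 ha2
    constructor <;> nlinarith [ha1, ha2]
  have hs0 : 0 ≤ s := by rw [hs_def]; positivity
  -- k and its defining bracket
  set k : Int := PySem.Int.floordiv (s - 1) 2 with hk_def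
  have hk : 2 * k ≤ s - 1 ∧ s - 1 < 2 * k + 2 := by
    have := PySem.Int.floordiv_eq_ediv_of_pos (a := s - 1) (b := 2) (by norm_num)
    rw [hk_def, this]; omega
  -- the two bracket inequalities for k
  have hklo : k * (k + 1) ≤ 2 * n := by nlinarith [hsq.1, hsq.2, hk.1, hk.2]
  have hkhi : 2 * n ≤ k * (k + 3) := by
    -- 2n ≤ k²+3k+1 from the sqrt bracket, and k²+3k+1 is odd while 2n is even
    have ha1 : 2 * n ≤ k * k + 3 * k + 1 := by nlinarith [hsq.1, hsq.2, hk.1, hk.2]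
    obtain ⟨m, hm⟩ := Int.even_mul_succ_self k
    have ha2 : n ≤ m + k := by nlinarith [hm, ha1]
    nlinarith [hm, ha2]
  have hs3 : 3 ≤ s := by nlinarith [hsq.1, hsq.2]
  have hk0 : 0 ≤ k := by omega
  have hk1 : 1 ≤ k := by nlinarith [hkhi]
  -- B's final element: the floordiv is an exact halving
  have hflo : PySem.Int.floordiv (k * (k - 1)) 2 * 2 = k * (k - 1) := by
    have h2 : Even (k * (k - 1)) := by
      obtain ⟨m, hm⟩ := Int.even_mul_succ_self (k - 1)
      exact ⟨m, by linarith⟩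
    obtain ⟨m, hm⟩ := h2
    rw [PySem.Int.floordiv_eq_ediv_of_pos (by norm_num)]; omega
  -- A's loop bound m = 2t+1 covers all of 1..k-1
  set t : Int := (n.toNat.sqrt : Int) with ht_def
  have htq : t * t ≤ n ∧ n < (t + 1) * (t + 1) := by
    have ha1 : (t : Int) ^ 2 ≤ ((n.toNat : Nat) : Int) := by
      rw [ht_def]; exact_mod_cast Nat.sqrt_le' n.toNat
    have ha2 : ((n.toNat : Nat) : Int) < (t + 1) ^ 2 := by
      rw [ht_def]; exact_mod_cast Nat.lt_succ_sqrt' n.toNat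
    rw [Int.toNat_of_nonneg (by omega)] at ha1 ha2
    constructor <;> nlinarith [ha1, ha2]
  have ht0 : 0 ≤ t := by rw [ht_def]; positivity
  have hkm : k ≤ 2 * t + 1 := by
    by_contra hcon
    push Not at hcon
    have h2 : (2 * t + 2) * (2 * t + 3) ≤ k * (k + 1) := by nlinarith [ht0]
    nlinarith [htq.2, hklo]
  by_cases h1 : n = 1
  · -- A's early-return branch: k = 1 there, so B also yields [1]
    have hs3' : s ≤ 3 := by nlinarith [hsq.1]
    have hkk : k = 1 := by omega
    have ha1 : max_num_prizes n = [1] := by unfold max_num_prizes; rw [if_pos h1]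
    have hb1 : max_num_prizes_alt n
        = PySem.List.pyRange 1 k 1 ++ [n - PySem.Int.floordiv (k * (k - 1)) 2] := rfl
    rw [ha1, hb1, hkk, h1, PySem.List.pyRange_one_eq_nil (le_refl 1)]
    norm_num [PySem.Int.floordiv_eq_ediv_of_pos]
  -- both sides in explicit form
  have ha : max_num_prizes n
      = ((PySem.List.pyRange 1 (2 * t + 1) 1).foldl pvStep ([], n)).1
        ++ [((PySem.List.pyRange 1 (2 * t + 1) 1).foldl pvStep ([], n)).2] := by
    unfold max_num_prizes
    rw [if_neg h1]
    rfl
  have hb : max_num_prizes_alt n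
      = PySem.List.pyRange 1 k 1 ++ [n - PySem.Int.floordiv (k * (k - 1)) 2] := rfl
  rw [ha, hb]
  -- split the loop range at k and apply the two phases
  have hsplit : PySem.List.pyRange 1 (2 * t + 1) 1
      = PySem.List.pyRange 1 k 1 ++ PySem.List.pyRange k (2 * t + 1) 1 :=
    PySem.List.pyRange_one_append 1 k (2 * t + 1) hk1 hkm
  obtain ⟨S, hS⟩ : ∃ S : Int, 2 * S = k * (k - 1) := by
    obtain ⟨m, hm⟩ := Int.even_mul_succ_self (k - 1)
    exact ⟨m, by linarith⟩
  obtain ⟨j, hj⟩ : ∃ j : Nat, (j : Int) = k := ⟨k.toNat, Int.toNat_of_nonneg hk0⟩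
  have hph1 := pvPhase1 j n S (by rw [hj]; linarith) (by rw [hj]; linarith)
  rw [hj] at hph1
  rw [hsplit, List.foldl_append, hph1,
    pvPhase2 _ _ _ (by
      intro i hi
      have hmem := (PySem.List.mem_pyRange_one).1 hi
      nlinarith [hkhi, hS, hmem.1])]
  have harith : n - PySem.Int.floordiv (k * (k - 1)) 2 = n - S := by omega
  rw [harith]
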